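-- pv_equiv track=rewrite | github.com/belenes/parser | avigliano_lexer_v3.py | a_LLaAbierta
-- ===== SOURCE A (Python) =====
-- def a_LLaAbierta(src):
--     s = 1
--     for c in src:
--         if s==1 and c=="{":
--             s = 2
--         else:
--             s = -1
--             break
--     return s == 2
-- ===== SOURCE B (Python) =====
-- def a_LLaAbierta(src):
--     return list(src) == ["{"]
-- ===== Notes on version B (the rewrite author's own statement) =====
-- stated objective: simpler
-- what changed: Replaces the state-machine scan (state flag, early break) with a single materialize-and-compare: list(src) == ["{"].
import Mathlib
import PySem

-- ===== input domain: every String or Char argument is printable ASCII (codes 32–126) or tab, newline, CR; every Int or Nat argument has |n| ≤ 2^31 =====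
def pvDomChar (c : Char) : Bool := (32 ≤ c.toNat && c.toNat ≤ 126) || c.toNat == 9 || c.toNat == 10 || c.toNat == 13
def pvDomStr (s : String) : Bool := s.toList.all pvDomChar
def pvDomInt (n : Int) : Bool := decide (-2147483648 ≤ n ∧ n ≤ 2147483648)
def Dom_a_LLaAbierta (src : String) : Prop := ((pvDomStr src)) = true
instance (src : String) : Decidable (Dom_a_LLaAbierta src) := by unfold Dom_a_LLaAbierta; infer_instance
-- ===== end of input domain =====

-- B replaces A's state-machine scan with materialize-and-compare (list(src) == ["{"]); objective: simpler.

-- ===== PORT A =====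
-- the for-loop with early break: state s starts at 1; on each char either advance to 2 or set -1 and break
def aLoop : List Char → Int → Int
  | [], s => s
  | c :: cs, s => if s == 1 && c == '{' then aLoop cs 2 else -1

def a_LLaAbierta (src : String) : Bool := aLoop src.toList 1 == 2

-- ===== PORT B =====
def a_LLaAbierta_alt (src : String) : Bool := src.toList == ['{']

-- ===== PRECONDITION & SPEC =====
def Spec_a_LLaAbierta (src : String) (out : Bool) : Prop := out = a_LLaAbierta_alt src
instance (src : String) (out : Bool) : Decidable (Spec_a_LLaAbierta src out) := by unfold Spec_a_LLaAbierta; infer_instance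

-- ===== CLAIM (what is proved, stated in full; the proofs are below) =====
def Claim_equal_a_LLaAbierta : Prop := ∀ (src : String), Dom_a_LLaAbierta src → Spec_a_LLaAbierta src (a_LLaAbierta src)

-- ===== LEMMAS AND PROOFS =====
theorem aLoop_eq (l : List Char) : (aLoop l 1 == 2) = (l == ['{']) := by
  cases l with
  | nil => decide
  | cons c cs =>
    by_cases hc : c = '{'
    · subst hc
      cases cs with
      | nil => decide
      | cons d ds => simp [aLoop]
    · simp [aLoop, hc]

-- ===== VERDICT (by name: the statement is the Claim_ definition above) =====
theorem a_LLaAbierta_spec : Claim_equal_a_LLaAbierta := by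
  intro src _
  unfold Spec_a_LLaAbierta a_LLaAbierta a_LLaAbierta_alt
  exact aLoop_eq src.toList
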